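-- pv_equiv track=rewrite | github.com/Kamalabot/api_play | test_runners/simple_execution.py | incrementor
-- ===== SOURCE A (Python) =====
-- def incrementor(num :int, diff: int):
--     x = 0
--     while True:
--         x = x + diff
--         num = num - 1
--         if num == 0:
--             break
--     return x
-- ===== SOURCE B (Python) =====
-- def incrementor(num: int, diff: int):
--     return num * diff
-- ===== Notes on version B (the rewrite author's own statement) =====
-- stated objective: faster
-- what changed: Replaces the num-iteration accumulation loop with the closed form num*diff; Pre_ requires num >= 1 because A never terminates for num <= 0.
import Mathlib
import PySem

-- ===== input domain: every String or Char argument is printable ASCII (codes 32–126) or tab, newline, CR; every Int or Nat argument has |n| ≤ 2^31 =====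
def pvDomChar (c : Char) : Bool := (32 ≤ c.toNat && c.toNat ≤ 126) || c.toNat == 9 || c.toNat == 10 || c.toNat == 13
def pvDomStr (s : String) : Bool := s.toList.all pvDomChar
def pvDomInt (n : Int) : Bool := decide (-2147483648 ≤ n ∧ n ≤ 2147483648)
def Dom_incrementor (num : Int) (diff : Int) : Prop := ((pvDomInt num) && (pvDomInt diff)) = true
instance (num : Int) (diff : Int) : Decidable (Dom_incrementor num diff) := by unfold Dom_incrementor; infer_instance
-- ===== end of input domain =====

-- B replaces A's num-iteration accumulation loop with the closed form num*diff (faster);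
-- A never terminates for num ≤ 0, so Pre_ requires num ≥ 1.

-- ===== PORT A =====
-- A's while-loop: x += diff; num -= 1; break when num == 0.
-- The loop runs exactly num times when num ≥ 1 (Pre_); for num ≤ 0 Python diverges,
-- so the port uses num.toNat as fuel (faithful on all of Pre_).
def incrementorLoop : Nat → Int → Int → Int
  | 0, _, x => x
  | n + 1, diff, x =>
    let x' := x + diff
    if n = 0 then x' else incrementorLoop n diff x'

def incrementor (num : Int) (diff : Int) : Int := incrementorLoop num.toNat diff 0

-- ===== PORT B =====
def incrementor_alt (num : Int) (diff : Int) : Int := num * diff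

-- ===== PRECONDITION & SPEC =====
-- Pre_ excludes num ≤ 0, on which A's while-loop never terminates.
def Pre_incrementor (num : Int) (diff : Int) : Prop := 1 ≤ num
instance (num : Int) (diff : Int) : Decidable (Pre_incrementor num diff) := by unfold Pre_incrementor; infer_instance
def pvWitness_incrementor : Int × Int := (3, 5)

def Spec_incrementor (num : Int) (diff : Int) (out : Int) : Prop := out = incrementor_alt num diff
instance (num : Int) (diff : Int) (out : Int) : Decidable (Spec_incrementor num diff out) := by unfold Spec_incrementor; infer_instance

-- ===== CLAIM (what is proved, stated in full; the proofs are below) =====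
def Claim_equal_incrementor : Prop := ∀ (num : Int) (diff : Int), Dom_incrementor num diff → Pre_incrementor num diff → Spec_incrementor num diff (incrementor num diff)

-- ===== LEMMAS AND PROOFS =====
theorem incrementorLoop_closed (n : Nat) (diff x : Int) :
    incrementorLoop (n + 1) diff x = x + (n + 1) * diff := by
  induction n generalizing x with
  | zero => simp [incrementorLoop]
  | succ k ih =>
    rw [incrementorLoop]
    simp only [Nat.succ_ne_zero, if_false]
    rw [ih]
    push_cast
    ring

-- ===== VERDICT (by name: the statement is the Claim_ definition above) =====
theorem incrementor_spec : Claim_equal_incrementor := by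
  intro num diff _ hpre
  have h1 : 1 ≤ num := hpre
  unfold Spec_incrementor incrementor incrementor_alt
  obtain ⟨k, hk⟩ : ∃ k : Nat, num.toNat = k + 1 := ⟨num.toNat - 1, by omega⟩
  rw [hk, incrementorLoop_closed]
  have : ((k : Int) + 1) = num := by omega
  rw [this]; ring
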